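-- pv_equiv track=rewrite | github.com/VHKoisa/kiva-challenge | chat_systems/chat_system_single_image_kiva_reduced.py | eval_response
-- ===== SOURCE A (Python) =====
-- def eval_response(response, answers, all_choices):
--     all_available_choices = {}
--     for choice in all_choices:
--         if choice in response:
--             all_available_choices[choice] = response.index(choice)
--
--     if len(all_available_choices) == 0:
--         return False
--
--     extracted_choice = min(all_available_choices, key=all_available_choices.get)
--     return any(answer == extracted_choice for answer in answers)
-- ===== SOURCE B (Python) =====
-- def eval_response(response, answers, all_choices):
--     best_choice = None
--     best_index = -1
--     for choice in all_choices:
--         if choice in response: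
--             idx = response.index(choice)
--             if best_choice is None or idx < best_index:
--                 best_choice, best_index = choice, idx
--     if best_choice is None:
--         return False
--     return best_choice in answers
-- ===== Notes on version B (the rewrite author's own statement) =====
-- stated objective: simpler
-- what changed: Replaces the build-dict-then-min(key=dict.get) structure with a single pass over all_choices keeping scalar best_choice/best_index (strict < preserves min's first-wins tie-break), and a membership test instead of any().
import Mathlib
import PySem

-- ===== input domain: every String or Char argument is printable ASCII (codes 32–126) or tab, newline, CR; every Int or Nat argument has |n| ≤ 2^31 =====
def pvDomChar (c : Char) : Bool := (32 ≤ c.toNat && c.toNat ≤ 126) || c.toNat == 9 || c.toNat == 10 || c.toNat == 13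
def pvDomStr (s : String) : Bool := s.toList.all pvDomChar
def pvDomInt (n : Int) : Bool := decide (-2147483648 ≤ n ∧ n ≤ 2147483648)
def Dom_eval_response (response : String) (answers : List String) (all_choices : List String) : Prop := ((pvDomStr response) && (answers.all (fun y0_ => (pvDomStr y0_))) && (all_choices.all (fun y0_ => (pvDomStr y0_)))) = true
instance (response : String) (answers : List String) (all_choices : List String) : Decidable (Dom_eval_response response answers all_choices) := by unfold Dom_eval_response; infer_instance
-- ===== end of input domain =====

-- B replaces A's build-dict-then-min(key=dict.get) structure with one scan keeping scalar
-- best_choice/best_index (strict < keeps min's first-wins tie-break) and a membership test.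

-- ===== PORT A =====
-- dict choice -> first index, then min over keys by the stored index, then any(answer == extracted)
def eval_response (response : String) (answers : List String) (all_choices : List String) : Bool :=
  let d : PySem.Dict String Int :=
    all_choices.foldl
      (fun (d : PySem.Dict String Int) choice =>
        if PySem.Str.isIn choice response then
          d.insert choice (PySem.Str.find response choice)   -- response.index(choice); guarded, so find = index
        else d)
      PySem.Dict.empty
  if d.size = 0 then false
  else
    match PySem.List.min? d.keys (fun k => d.getD k 0) with  -- min(dict, key=dict.get); keys all present
    | none => false                                          -- unreachable: size ≠ 0
    | some extracted => answers.any (fun answer => answer == extracted)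

-- ===== PORT B =====
-- single pass with scalar best; None modelled as Option of the (choice, index) pair
def eval_response_alt (response : String) (answers : List String) (all_choices : List String) : Bool :=
  let best : Option (String × Int) :=
    all_choices.foldl
      (fun (b : Option (String × Int)) choice =>
        if PySem.Str.isIn choice response then
          let idx := PySem.Str.find response choice           -- response.index(choice); guarded
          match b with
          | none => some (choice, idx)
          | some (bc, bi) => if idx < bi then some (choice, idx) else some (bc, bi)
        else b)
      none
  match best with
  | none => false
  | some (bc, _) => answers.contains bc

-- ===== PRECONDITION & SPEC =====
def Spec_eval_response (response : String) (answers : List String) (all_choices : List String) (out : Bool) : Prop := out = eval_response_alt response answers all_choices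
instance (response : String) (answers : List String) (all_choices : List String) (out : Bool) : Decidable (Spec_eval_response response answers all_choices out) := by unfold Spec_eval_response; infer_instance

-- ===== CLAIM (what is proved, stated in full; the proofs are below) =====
def Claim_equal_eval_response : Prop := ∀ (response : String) (answers : List String) (all_choices : List String), Dom_eval_response response answers all_choices → Spec_eval_response response answers all_choices (eval_response response answers all_choices)

-- ===== LEMMAS AND PROOFS =====

/-- The step of Python's `min` with a key (first extremal wins ties). -/
def pvStep (f : String → Int) (a : Option String) (x : String) : Option String :=
  match a with
  | none => some x
  | some m => if f x < f m then some x else some m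

theorem pv_min?_eq_foldl (xs : List String) (f : String → Int) :
    PySem.List.min? xs f = xs.foldl (pvStep f) none := by
  unfold PySem.List.min?
  congr 1
  funext a x
  cases a <;> rfl

theorem pv_foldl_step_append (l : List String) (x : String) (f : String → Int) (a : Option String) :
    (l ++ [x]).foldl (pvStep f) a = pvStep f (l.foldl (pvStep f) a) x := by
  simp [List.foldl_append]

/-- B's fold, fused through filter/map, is the `pvStep` fold over the filtered list. -/
theorem pv_bfold_eq (response : String) (f : String → Int)
    (hf : ∀ c, f c = PySem.Str.find response c) :
    ∀ (l : List String) (o : Option String),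
      l.foldl
        (fun (b : Option (String × Int)) choice =>
          if PySem.Str.isIn choice response then
            let idx := PySem.Str.find response choice
            match b with
            | none => some (choice, idx)
            | some (bc, bi) => if idx < bi then some (choice, idx) else some (bc, bi)
          else b)
        (o.map (fun c => (c, f c)))
      = ((l.filter (fun c => PySem.Str.isIn c response)).foldl (pvStep f) o).map (fun c => (c, f c)) := by
  intro l
  induction l with
  | nil => intro o; simp
  | cons c l ih =>
    intro o
    by_cases hc : PySem.Str.isIn c response
    · have hstep : (match o.map (fun c => (c, f c)) with
          | none => some (c, PySem.Str.find response c)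
          | some (bc, bi) => if PySem.Str.find response c < bi then some (c, PySem.Str.find response c) else some (bc, bi))
          = (pvStep f o c).map (fun c => (c, f c)) := by
        cases o with
        | none => simp [pvStep, hf]
        | some m => simp [pvStep, hf]; split <;> simp
      simp only [List.foldl_cons, List.filter_cons, hc, if_pos]
      rw [hstep, ih (pvStep f o c)]
    · simp only [List.foldl_cons, List.filter_cons, hc]
      simp only [Bool.false_eq_true, if_false]
      exact ih o

/-- A's dict fold: keys are `Set.add`-accumulated in-response choices, values are the find index. -/
theorem pv_dict_inv (response : String) (f : String → Int)
    (hf : ∀ c, f c = PySem.Str.find response c) :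
    ∀ (l : List String) (d : PySem.Dict String Int),
      (∀ k ∈ d.keys, d.getD k 0 = f k) →
      (l.foldl
        (fun (d : PySem.Dict String Int) choice =>
          if PySem.Str.isIn choice response then
            d.insert choice (PySem.Str.find response choice)
          else d) d).keys
        = (l.filter (fun c => PySem.Str.isIn c response)).foldl PySem.Set.add d.keys
      ∧ (∀ k ∈ (l.foldl
          (fun (d : PySem.Dict String Int) choice =>
            if PySem.Str.isIn choice response then
              d.insert choice (PySem.Str.find response choice)
            else d) d).keys,
          (l.foldl
            (fun (d : PySem.Dict String Int) choice =>
              if PySem.Str.isIn choice response then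
                d.insert choice (PySem.Str.find response choice)
              else d) d).getD k 0 = f k) := by
  intro l
  induction l with
  | nil => intro d hd; simpa using hd
  | cons c l ih =>
    intro d hd
    by_cases hc : PySem.Str.isIn c response
    · simp only [List.foldl_cons, List.filter_cons, hc, ite_true]
      have hd' : ∀ k ∈ (d.insert c (PySem.Str.find response c)).keys,
          (d.insert c (PySem.Str.find response c)).getD k 0 = f k := by
        intro k hk
        rw [PySem.Dict.getD_insert]
        by_cases hkc : k = c
        · simp [hkc, hf]
        · simp only [hkc, if_false]
          apply hd
          by_cases hcon : d.contains c
          · rwa [PySem.Dict.keys_insert_of_contains d _ hcon] at hk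
          · rw [PySem.Dict.keys_insert_of_not_contains d _ (by simpa using hcon)] at hk
            rcases List.mem_append.mp hk with h | h
            · exact h
            · simp at h; exact absurd h hkc
      have hkeys : (d.insert c (PySem.Str.find response c)).keys = PySem.Set.add d.keys c := by
        by_cases hcon : d.contains c
        · rw [PySem.Dict.keys_insert_of_contains d _ hcon]
          have : PySem.Set.contains d.keys c = true := by
            rw [PySem.Set.contains_iff]
            exact (PySem.Dict.contains_iff_mem_keys d c).mp hcon
          simp only [PySem.Set.add, this, if_true]
        · rw [PySem.Dict.keys_insert_of_not_contains d _ (by simpa using hcon)]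
          have : PySem.Set.contains d.keys c = false := by
            by_contra h
            have := (PySem.Set.contains_iff d.keys c).mp (by simpa using h)
            exact hcon ((PySem.Dict.contains_iff_mem_keys d c).mpr this)
          simp only [PySem.Set.add, this, Bool.false_eq_true, if_false]
      have := ih (d.insert c (PySem.Str.find response c)) hd'
      rw [hkeys] at this
      exact this
    · simp only [List.foldl_cons, List.filter_cons, hc]
      simp only [Bool.false_eq_true, if_false]
      exact ih d hd

/-- `pvStep`-fold congruence: the key function only matters on the list and the accumulator. -/
theorem pv_foldl_step_congr (f g : String → Int) :
    ∀ (xs : List String) (a : Option String),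
      (∀ x ∈ xs, f x = g x) → (∀ m, a = some m → f m = g m) →
      xs.foldl (pvStep f) a = xs.foldl (pvStep g) a
      ∧ (∀ m, xs.foldl (pvStep f) a = some m → f m = g m) := by
  intro xs
  induction xs with
  | nil => intro a _ ha; exact ⟨rfl, by simpa using ha⟩
  | cons x xs ih =>
    intro a hxs ha
    have hx : f x = g x := hxs x (List.mem_cons_self ..)
    have hstep : pvStep f a x = pvStep g a x := by
      cases a with
      | none => rfl
      | some m => simp [pvStep, hx, ha m rfl]
    have hstep' : ∀ m, pvStep f a x = some m → f m = g m := by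
      intro m hm
      cases a with
      | none => simp [pvStep] at hm; subst hm; exact hx
      | some m' =>
        simp only [pvStep] at hm
        split at hm <;> (simp at hm; subst hm)
        · exact hx
        · exact ha m' rfl
    have := ih (pvStep f a x) (fun y hy => hxs y (List.mem_cons_of_mem _ hy)) hstep'
    simp only [List.foldl_cons]
    exact ⟨by rw [this.1, hstep], this.2⟩

theorem pv_min?_congr (xs : List String) (f g : String → Int)
    (h : ∀ x ∈ xs, f x = g x) : PySem.List.min? xs f = PySem.List.min? xs g := by
  rw [pv_min?_eq_foldl, pv_min?_eq_foldl]
  exact (pv_foldl_step_congr f g xs none h (by intro m hm; cases hm)).1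

/-- Deduplicating (first occurrences kept) does not change `min?` when the key is a
    function of the element. -/
theorem pv_min?_ofList (f : String → Int) (xs : List String) :
    PySem.List.min? (PySem.Set.ofList xs) f = PySem.List.min? xs f := by
  induction xs using List.reverseRecOn with
  | nil => simp [PySem.Set.ofList_eq_foldl]
  | append_singleton xs x ih =>
    have hof : PySem.Set.ofList (xs ++ [x]) = PySem.Set.add (PySem.Set.ofList xs) x := by
      rw [PySem.Set.ofList_eq_foldl, PySem.Set.ofList_eq_foldl, List.foldl_append]
      rfl
    rw [hof]
    have happ : PySem.List.min? (xs ++ [x]) f = pvStep f (PySem.List.min? xs f) x := by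
      rw [pv_min?_eq_foldl, pv_min?_eq_foldl, pv_foldl_step_append]
    by_cases hmem : PySem.Set.contains (PySem.Set.ofList xs) x
    · have hx : x ∈ xs := (PySem.Set.mem_ofList xs x).mp
        ((PySem.Set.contains_iff _ x).mp hmem)
      have hne : xs ≠ [] := by intro h; subst h; simp at hx
      obtain ⟨m, hm⟩ : ∃ m, PySem.List.min? xs f = some m := by
        cases h : PySem.List.min? xs f with
        | none => exact absurd ((PySem.List.min?_eq_none_iff xs f).mp h) hne
        | some m => exact ⟨m, rfl⟩
      have hle : f m ≤ f x := PySem.List.min?_isMin hm x hx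
      have hadd : PySem.Set.add (PySem.Set.ofList xs) x = PySem.Set.ofList xs := by
        simp only [PySem.Set.add, hmem, if_true]
      rw [hadd, ih, happ, hm]
      simp [pvStep, not_lt.mpr hle]
    · have hadd : PySem.Set.add (PySem.Set.ofList xs) x = PySem.Set.ofList xs ++ [x] := by
        simp only [PySem.Set.add, hmem, Bool.false_eq_true, if_false]
      rw [hadd, happ, pv_min?_eq_foldl (PySem.Set.ofList xs ++ [x]), pv_foldl_step_append,
        ← pv_min?_eq_foldl, ih]

theorem pv_any_beq (answers : List String) (m : String) :
    answers.any (fun answer => answer == m) = answers.contains m := by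
  induction answers with
  | nil => rfl
  | cons a l ih =>
    simp only [List.any_cons, List.contains_cons, ih]
    by_cases h : a = m
    · simp [h]
    · have h1 : (a == m) = false := by simpa using h
      have h2 : (m == a) = false := by simpa using Ne.symm h
      simp [h1, h2]

-- ===== VERDICT (by name: the statement is the Claim_ definition above) =====
theorem eval_response_spec : Claim_equal_eval_response := by
  intro response answers all_choices _
  unfold Spec_eval_response eval_response eval_response_alt
  set f : String → Int := fun c => PySem.Str.find response c with hfdef
  have hf : ∀ c, f c = PySem.Str.find response c := fun _ => rfl
  set fl := all_choices.filter (fun c => PySem.Str.isIn c response) with hfl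
  -- dict facts
  have hdict := pv_dict_inv response f hf all_choices PySem.Dict.empty
    (by simp [PySem.Dict.keys_empty])
  set d := all_choices.foldl
    (fun (d : PySem.Dict String Int) choice =>
      if PySem.Str.isIn choice response then
        d.insert choice (PySem.Str.find response choice)
      else d) PySem.Dict.empty with hd
  have hkeys : d.keys = PySem.Set.ofList fl := by
    rw [hdict.1, PySem.Dict.keys_empty, ← PySem.Set.ofList_eq_foldl]
  -- A's min over keys by stored value = min? fl f
  have hmin : PySem.List.min? d.keys (fun k => d.getD k 0) = PySem.List.min? fl f := by
    rw [pv_min?_congr d.keys (fun k => d.getD k 0) f hdict.2, hkeys, pv_min?_ofList]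
  -- B's fold = (min? fl f).map (c ↦ (c, f c))
  have hb := pv_bfold_eq response f hf all_choices none
  simp only [Option.map_none] at hb
  rw [hb, ← hfl, ← pv_min?_eq_foldl]
  -- size = 0 ↔ keys = []
  have hsize : d.size = d.keys.length := by
    simp [PySem.Dict.size, PySem.Dict.keys]
  cases hflc : fl with
  | nil =>
    have : d.size = 0 := by
      rw [hsize, hkeys, hflc]
      simp [PySem.Set.ofList_eq_foldl]
    simp [this, PySem.List.min?]
  | cons c rest =>
    have hne : fl ≠ [] := by rw [hflc]; exact List.cons_ne_nil _ _
    obtain ⟨m, hm⟩ : ∃ m, PySem.List.min? fl f = some m := by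
      cases h : PySem.List.min? fl f with
      | none => exact absurd ((PySem.List.min?_eq_none_iff fl f).mp h) hne
      | some m => exact ⟨m, rfl⟩
    have hkne : d.keys ≠ [] := by
      rw [hkeys, hflc]
      intro h
      have : c ∈ PySem.Set.ofList (c :: rest) := (PySem.Set.mem_ofList _ c).mpr (List.mem_cons_self ..)
      rw [h] at this
      simp at this
    have hsz : ¬ d.size = 0 := by
      rw [hsize]
      simpa [List.length_eq_zero_iff] using hkne
    rw [← hflc, hm]
    simp only [hsz, if_false, hmin, hm]
    exact pv_any_beq answers m
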